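-- pv_equiv track=rewrite | github.com/yap231995/CS2040_Tutorial | Tutorial 1.py | CheckReachTreasure
-- ===== SOURCE A (Python) =====
-- def CheckReachTreasure(track):
--     fuel = 0
--     for i in range(len(track)):
--         if fuel < track[i]:
--             fuel = track[i]
--         if fuel == 0: # unable to move
--             return False
--         if (i == len(track) -1):
--             return True
--         fuel -= 1
-- ===== SOURCE B (Python) =====
-- def CheckReachTreasure(track):
--     # Backward greedy: goal = leftmost position from which position len(track)
--     # (one step past the last index) is reachable; treasure reachable iff goal == 0.
--     goal = len(track)
--     for i in range(len(track) - 1, -1, -1):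
--         if i + track[i] >= goal:
--             goal = i
--     return goal == 0
-- ===== Notes on version B (the rewrite author's own statement) =====
-- stated objective: alternative
-- what changed: Replaces A's forward simulation with a remaining-fuel counter by the classic backward jump-game greedy: scan indices from the end, keep the leftmost 'goal' position from which position len(track) is reachable, and return goal == 0; no fuel state, reversed traversal order, and no early exit.
-- outside the precondition, e.g. on CheckReachTreasure([]): A returns None, B returns True
import Mathlib
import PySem

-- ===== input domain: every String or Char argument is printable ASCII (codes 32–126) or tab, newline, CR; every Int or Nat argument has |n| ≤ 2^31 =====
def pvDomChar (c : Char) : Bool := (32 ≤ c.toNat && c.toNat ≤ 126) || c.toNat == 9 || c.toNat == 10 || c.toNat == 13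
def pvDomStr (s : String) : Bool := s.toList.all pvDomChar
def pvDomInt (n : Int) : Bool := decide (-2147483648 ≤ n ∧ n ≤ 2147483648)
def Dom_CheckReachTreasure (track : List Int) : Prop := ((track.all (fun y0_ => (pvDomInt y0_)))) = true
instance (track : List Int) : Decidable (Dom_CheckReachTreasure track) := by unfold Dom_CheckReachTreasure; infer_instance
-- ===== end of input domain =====

-- B replaces A's forward fuel-counter simulation by the backward jump-game greedy
-- (leftmost position from which the end is reachable); alternative, same O(n) cost.

-- ===== PORT A =====
-- the index i of the Python loop is always in range, so track[i] is track.getD i 0 here (exact)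
def CheckReachTreasureGoA (track : List Int) (fuel : Int) (i : Nat) : Bool :=
  if i < track.length then
    let fuel' := if fuel < track.getD i 0 then track.getD i 0 else fuel
    if fuel' = 0 then false
    else if i = track.length - 1 then true
    else CheckReachTreasureGoA track (fuel' - 1) (i + 1)
  else false
termination_by track.length - i

def CheckReachTreasure (track : List Int) : Bool :=
  CheckReachTreasureGoA track 0 0

-- ===== PORT B =====
-- Source B's reversed range-loop: goB track i g processes indices i-1, i-2, …, 0 (in that
-- order) on the goal accumulator g; goal values are always indices, kept as Nat.
def CheckReachTreasureGoB (track : List Int) : Nat → Nat → Nat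
  | 0, g => g
  | i + 1, g => CheckReachTreasureGoB track i (if (g : Int) ≤ (i : Int) + track.getD i 0 then i else g)

def CheckReachTreasure_alt (track : List Int) : Bool :=
  CheckReachTreasureGoB track track.length track.length == 0

-- ===== PRECONDITION & SPEC =====
-- Pre_ excludes the empty list, on which the Python A falls through the loop and returns None (not a bool).
def Pre_CheckReachTreasure (track : List Int) : Prop := track ≠ []
instance (track : List Int) : Decidable (Pre_CheckReachTreasure track) := by unfold Pre_CheckReachTreasure; infer_instance
def pvWitness_CheckReachTreasure : List Int := [2, 0, 1, 0]

def Spec_CheckReachTreasure (track : List Int) (out : Bool) : Prop := out = CheckReachTreasure_alt track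
instance (track : List Int) (out : Bool) : Decidable (Spec_CheckReachTreasure track out) := by unfold Spec_CheckReachTreasure; infer_instance

-- ===== CLAIM (what is proved, stated in full; the proofs are below) =====
def Claim_equal_CheckReachTreasure : Prop := ∀ (track : List Int), Dom_CheckReachTreasure track → Pre_CheckReachTreasure track → Spec_CheckReachTreasure track (CheckReachTreasure track)

-- ===== LEMMAS AND PROOFS =====

-- the common characterisation: every position k < g is strictly jumped over by some index j ≤ k, j < i
def PVCov (track : List Int) (i g : Nat) : Prop :=
  ∀ k : Nat, k < g → ∃ j : Nat, j < i ∧ j ≤ k ∧ (j : Int) + track.getD j 0 > (k : Int)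

theorem goB_eq_zero_iff (track : List Int) :
    ∀ i g : Nat, i ≤ g → (CheckReachTreasureGoB track i g = 0 ↔ PVCov track i g) := by
  intro i
  induction i with
  | zero =>
    intro g _
    simp only [CheckReachTreasureGoB, PVCov]
    constructor
    · rintro rfl k hk; omega
    · intro h
      by_contra hg
      obtain ⟨j, hj, _, _⟩ := h 0 (by omega)
      omega
  | succ i ih =>
    intro g hig
    simp only [CheckReachTreasureGoB]
    split
    · rename_i hcond
      rw [ih i (le_refl i)]
      constructor
      · intro h k hk
        by_cases hki : k < i
        · obtain ⟨j, h1, h2, h3⟩ := h k hki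
          exact ⟨j, by omega, h2, h3⟩
        · exact ⟨i, by omega, by omega, by omega⟩
      · intro h k hk
        obtain ⟨j, h1, h2, h3⟩ := h k (by omega)
        exact ⟨j, by omega, h2, h3⟩
    · rename_i hcond
      rw [ih g (by omega)]
      constructor
      · intro h k hk
        obtain ⟨j, h1, h2, h3⟩ := h k hk
        exact ⟨j, by omega, h2, h3⟩
      · intro h k hk
        -- the witness at k = g-1 cannot be i, so it covers every k ≥ its position
        obtain ⟨j', h1', h2', h3'⟩ := h (g - 1) (by omega)
        have hj'i : j' ≠ i := by intro he; subst he; omega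
        by_cases hkj : j' ≤ k
        · have hgc : ((g - 1 : Nat) : Int) = (g : Int) - 1 := by omega
          rw [hgc] at h3'
          exact ⟨j', by omega, hkj, by omega⟩
        · obtain ⟨j, h1, h2, h3⟩ := h k hk
          exact ⟨j, by omega, h2, by omega⟩

theorem goA_aux (track : List Int) :
    ∀ d i : Nat, ∀ fuel : Int, track.length - i ≤ d → i < track.length → 0 ≤ fuel →
      (CheckReachTreasureGoA track fuel i = true ↔
        ∀ k : Nat, i ≤ k → k < track.length →
          ((∃ j : Nat, i ≤ j ∧ j ≤ k ∧ (j : Int) + track.getD j 0 > (k : Int)) ∨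
            fuel + (i : Int) > (k : Int))) := by
  intro d
  induction d with
  | zero => intro i fuel hd hi hf; omega
  | succ d ih => ?_
  intro i fuel hd hi hf
  rw [CheckReachTreasureGoA, if_pos hi]
  set t := track.getD i 0 with ht
  set fuel' := if fuel < t then t else fuel with hf'
  have hf'max : fuel' = fuel ∨ fuel' = t := by
    rw [hf']; split <;> simp
  have hf'ge : fuel ≤ fuel' ∧ t ≤ fuel' := by
    rw [hf']; constructor <;> (split <;> omega)
  by_cases h0 : fuel' = 0
  · rw [if_pos h0]
    refine iff_of_false (by simp) ?_
    intro h
    obtain (⟨j, h1, h2, h3⟩ | h4) := h i (le_refl i) hi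
    · have : j = i := by omega
      subst this; omega
    · omega
  · rw [if_neg h0]
    have hf'pos : 1 ≤ fuel' := by omega
    by_cases hlast : i = track.length - 1
    · rw [if_pos hlast]
      refine iff_of_true rfl ?_
      intro k hik hk
      have hki : k = i := by omega
      subst hki
      rcases hf'max with he | he
      · right
        have h1 : 1 ≤ fuel := he ▸ hf'pos
        omega
      · have h1 : 1 ≤ t := he ▸ hf'pos
        left; exact ⟨k, le_refl k, le_refl k, by omega⟩
    · rw [if_neg hlast]
      have hi1 : i + 1 < track.length := by omega
      rw [ih (i + 1) (fuel' - 1) (by omega) hi1 (by omega)]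
      have hr : fuel' - 1 + ((i : Nat) + 1 : Nat) = fuel' + (i : Int) := by push_cast; ring
      constructor
      · intro h k hik hk
        by_cases hki : k = i
        · subst hki
          rcases hf'max with he | he
          · right
            have h1 : 1 ≤ fuel := he ▸ hf'pos
            omega
          · have h1 : 1 ≤ t := he ▸ hf'pos
            left; exact ⟨k, le_refl k, le_refl k, by omega⟩
        · obtain (⟨j, h1, h2, h3⟩ | h4) := h k (by omega) hk
          · left; exact ⟨j, by omega, h2, h3⟩
          · rw [hr] at h4
            rcases hf'max with he | he
            · rw [he] at h4
              right; omega
            · rw [he] at h4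
              left; exact ⟨i, le_refl i, by omega, by omega⟩
      · intro h k hik hk
        obtain (⟨j, h1, h2, h3⟩ | h4) := h k (by omega) hk
        · by_cases hji : j = i
          · subst hji
            right; rw [hr]; omega
          · left; exact ⟨j, by omega, h2, h3⟩
        · right; rw [hr]; omega

-- ===== VERDICT (by name: the statement is the Claim_ definition above) =====
theorem CheckReachTreasure_spec : Claim_equal_CheckReachTreasure := by
  intro track _ hpre
  have hn : 0 < track.length := by
    cases track with
    | nil => exact absurd rfl hpre
    | cons a l => simp
  unfold Spec_CheckReachTreasure CheckReachTreasure CheckReachTreasure_alt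
  have hA := goA_aux track track.length 0 0 (by omega) hn (le_refl 0)
  have hB := goB_eq_zero_iff track track.length track.length (le_refl _)
  have hAB : CheckReachTreasureGoA track 0 0 = true ↔
      CheckReachTreasureGoB track track.length track.length = 0 := by
    rw [hA, hB]
    unfold PVCov
    constructor
    · intro h k hk
      obtain (⟨j, h1, h2, h3⟩ | h4) := h k (Nat.zero_le k) hk
      · exact ⟨j, by omega, h2, h3⟩
      · omega
    · intro h k _ hk
      obtain ⟨j, h1, h2, h3⟩ := h k hk
      exact Or.inl ⟨j, Nat.zero_le j, h2, h3⟩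
  by_cases hz : CheckReachTreasureGoB track track.length track.length = 0
  · rw [hAB.mpr hz]
    simp [hz]
  · have h1 : CheckReachTreasureGoA track 0 0 = false := by
      cases h : CheckReachTreasureGoA track 0 0
      · rfl
      · exact absurd (hAB.mp h) hz
    rw [h1]
    simp [hz]
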